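-- pv_equiv track=rewrite | github.com/asarandi/n-puzzle | solver2.py | solved_snail
-- ===== SOURCE A (Python) =====
-- def solved_snail(size):
--     lst = [[0 for x in range(size)] for y in range(size)]
--     moves = [(0,1),(1,0),(0,-1),(-1,0)]
--     row = 0
--     col = 0
--     i = 1
--     final = size * size
--     size -= 1
--     done = False
--     while not done and size > 0:
--         for move in moves:
--             if done:
--                 break
--             for _ in range(size):
--                 lst[row][col] = i
--                 row += move[0]
--                 col += move[1]
--                 i += 1
--                 if i == final:
--                     done = True
--                     break
--         row += 1
--         col += 1
--         size -= 2
--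
--     res = []
--     for row in lst:
--         for i in row:
--             res.append(i)
--     return tuple(res)
-- ===== SOURCE B (Python) =====
-- def solved_snail(size):
--     grid = [[0] * size for _ in range(size)]
--     top, bottom, left, right = 0, size - 1, 0, size - 1
--     v = 1
--     last = size * size - 1
--     while top <= bottom and left <= right and v <= last:
--         for c in range(left, right + 1):
--             if v > last:
--                 break
--             grid[top][c] = v
--             v += 1
--         top += 1
--         for r in range(top, bottom + 1):
--             if v > last:
--                 break
--             grid[r][right] = v
--             v += 1
--         right -= 1
--         for c in range(right, left - 1, -1):
--             if v > last:
--                 break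
--             grid[bottom][c] = v
--             v += 1
--         bottom -= 1
--         for r in range(bottom, top - 1, -1):
--             if v > last:
--                 break
--             grid[r][left] = v
--             v += 1
--         left += 1
--     return tuple(x for row in grid for x in row)
-- ===== Notes on version B (the rewrite author's own statement) =====
-- stated objective: alternative
-- what changed: Replaces A's direction-vector walk (a moves table with a running (row,col) cursor, a done flag and a shrinking side counter) by the standard four boundary pointers top/bottom/left/right contracted after each per-side pass, stopping after size*size-1 assignments so the last spiral cell keeps 0.
import Mathlib
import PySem

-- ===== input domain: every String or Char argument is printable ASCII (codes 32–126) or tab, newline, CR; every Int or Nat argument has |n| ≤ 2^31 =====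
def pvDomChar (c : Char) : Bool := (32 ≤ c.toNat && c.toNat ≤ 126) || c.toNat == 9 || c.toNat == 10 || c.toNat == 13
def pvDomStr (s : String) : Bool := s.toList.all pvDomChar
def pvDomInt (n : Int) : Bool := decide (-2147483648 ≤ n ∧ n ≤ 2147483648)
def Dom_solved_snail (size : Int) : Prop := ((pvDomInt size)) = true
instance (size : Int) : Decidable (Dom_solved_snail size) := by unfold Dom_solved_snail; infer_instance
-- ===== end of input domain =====

-- B rebuilds the snail goal with four contracting boundary pointers instead of A's
-- direction-vector walk with a done flag; same outputs (objective: alternative).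


-- ===== PORT A =====
-- lst[row][col] = v on the list-of-lists grid; .toNat is exact here: both programs
-- only ever write at indices 0 ≤ row, col < size
def pvSet (g : List (List Int)) (p : Int × Int) (v : Int) : List (List Int) :=
  g.modify p.1.toNat (fun row => row.set p.2.toNat v)

structure AState where
  g : List (List Int)
  row : Int
  col : Int
  i : Int
  done : Bool

-- one body of A's innermost loop (write, move, increment, check `i == final`);
-- after `done` is set A breaks, modelled by skipping the remaining iterations
def aStep (final dr dc : Int) (st : AState) : AState :=
  if st.done then st
  else
    { g := pvSet st.g (st.row, st.col) st.i, row := st.row + dr, col := st.col + dc,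
      i := st.i + 1, done := st.i + 1 == final }

-- `for _ in range(size)`: the iteration count of Python's range, taken as a Nat
def aSide (final dr dc : Int) : Nat → AState → AState
  | 0, st => st
  | n + 1, st => aSide final dr dc n (aStep final dr dc st)

-- `for move in moves` (the `if done: break` is subsumed by aStep skipping)
def aRing (final size : Int) (st : AState) : AState :=
  aSide final (-1) 0 size.toNat (aSide final 0 (-1) size.toNat
    (aSide final 1 0 size.toNat (aSide final 0 1 size.toNat st)))

-- A's while loop; the Nat argument is fuel (enough iterations are supplied below)
def aLoop (final : Int) : Nat → AState → Int → List (List Int)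
  | 0, st, _ => st.g
  | fuel + 1, st, size =>
      if st.done = false ∧ 0 < size then
        let st' := aRing final size st
        aLoop final fuel { st' with row := st'.row + 1, col := st'.col + 1 } (size - 2)
      else st.g

def solved_snail (size : Int) : List Int :=
  let lst := List.replicate size.toNat (List.replicate size.toNat 0)
  let final := size * size
  let g := aLoop final (size - 1).toNat ⟨lst, 0, 0, 1, false⟩ (size - 1)
  g.flatMap (fun row => row)

-- ===== PORT B =====
structure BState where
  g : List (List Int)
  v : Int

def bWrite (p : Int × Int) (st : BState) : BState :=
  { g := pvSet st.g p st.v, v := st.v + 1 }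

-- `for c in range(left, right+1)` with `if v > last: break`; Nat = the range length
def bRowR (last top : Int) : Nat → Int → BState → BState
  | 0, _, st => st
  | n + 1, c, st => if last < st.v then st else bRowR last top n (c + 1) (bWrite (top, c) st)

-- `for r in range(top, bottom+1)`
def bColD (last right : Int) : Nat → Int → BState → BState
  | 0, _, st => st
  | n + 1, r, st => if last < st.v then st else bColD last right n (r + 1) (bWrite (r, right) st)

-- `for c in range(right, left-1, -1)`
def bRowL (last bottom : Int) : Nat → Int → BState → BState
  | 0, _, st => st
  | n + 1, c, st => if last < st.v then st else bRowL last bottom n (c - 1) (bWrite (bottom, c) st)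

-- `for r in range(bottom, top-1, -1)`
def bColU (last left : Int) : Nat → Int → BState → BState
  | 0, _, st => st
  | n + 1, r, st => if last < st.v then st else bColU last left n (r - 1) (bWrite (r, left) st)

-- B's while loop over the contracting boundaries (Nat fuel as for aLoop)
def bLoop (last : Int) : Nat → Int → Int → Int → Int → BState → List (List Int)
  | 0, _, _, _, _, st => st.g
  | fuel + 1, top, bottom, left, right, st =>
      if top ≤ bottom ∧ left ≤ right ∧ st.v ≤ last then
        let s1 := bRowR last top (right + 1 - left).toNat left st
        let s2 := bColD last right (bottom + 1 - (top + 1)).toNat (top + 1) s1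
        let s3 := bRowL last bottom (right - 1 + 1 - left).toNat (right - 1) s2
        let s4 := bColU last left (bottom - 1 + 1 - (top + 1)).toNat (bottom - 1) s3
        bLoop last fuel (top + 1) (bottom - 1) (left + 1) (right - 1) s4
      else st.g

def solved_snail_alt (size : Int) : List Int :=
  let grid := List.replicate size.toNat (List.replicate size.toNat 0)
  let last := size * size - 1
  let g := bLoop last (size - 1).toNat 0 (size - 1) 0 (size - 1) ⟨grid, 1⟩
  g.flatMap (fun row => row)

-- ===== PRECONDITION & SPEC =====
def Spec_solved_snail (size : Int) (out : List Int) : Prop := out = solved_snail_alt size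
instance (size : Int) (out : List Int) : Decidable (Spec_solved_snail size out) := by unfold Spec_solved_snail; infer_instance

-- ===== CLAIM (what is proved, stated in full; the proofs are below) =====
def Claim_equal_solved_snail : Prop := ∀ (size : Int), Dom_solved_snail size → Spec_solved_snail size (solved_snail size)

-- ===== LEMMAS AND PROOFS =====
def applyW (g : List (List Int)) (ws : List ((Int × Int) × Int)) : List (List Int) :=
  ws.foldl (fun g pv => pvSet g pv.1 pv.2) g

def wseq (r c dr dc v : Int) : Nat → List ((Int × Int) × Int)
  | 0 => []
  | t + 1 => ((r, c), v) :: wseq (r + dr) (c + dc) dr dc (v + 1) t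

theorem applyW_cons (g : List (List Int)) (p : (Int × Int) × Int) (ws : List ((Int × Int) × Int)) :
    applyW g (p :: ws) = applyW (pvSet g p.1 p.2) ws := rfl

theorem wseq_split (s t : Nat) (r c dr dc v : Int) :
    wseq r c dr dc v (s + t)
      = wseq r c dr dc v s ++ wseq (r + s * dr) (c + s * dc) dr dc (v + s) t := by
  induction s generalizing r c v with
  | zero => simp [wseq]
  | succ s ih =>
      have h : s + 1 + t = (s + t) + 1 := by omega
      rw [h]
      show ((r, c), v) :: wseq (r + dr) (c + dc) dr dc (v + 1) (s + t) = _
      rw [ih]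
      have e1 : r + dr + (s : Int) * dr = r + ((s + 1 : Nat) : Int) * dr := by push_cast; ring
      have e2 : c + dc + (s : Int) * dc = c + ((s + 1 : Nat) : Int) * dc := by push_cast; ring
      have e3 : v + 1 + (s : Int) = v + ((s + 1 : Nat) : Int) := by push_cast; ring
      rw [e1, e2, e3]
      simp [wseq]

theorem wseq_snoc (t : Nat) (r c dr dc v : Int) :
    wseq r c dr dc v (t + 1)
      = wseq r c dr dc v t ++ [((r + t * dr, c + t * dc), v + t)] := by
  rw [wseq_split t 1]; simp [wseq]

theorem aSide_skip (final dr dc : Int) (t : Nat) (st : AState) (h : st.done = true) :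
    aSide final dr dc t st = st := by
  induction t with
  | zero => rfl
  | succ t ih => rw [aSide, aStep, if_pos h, ih]

theorem aSide_run (t : Nat) (final dr dc : Int) : ∀ (r c i : Int) (g : List (List Int)),
    1 ≤ t → i + t ≤ final →
    aSide final dr dc t ⟨g, r, c, i, false⟩
      = ⟨applyW g (wseq r c dr dc i t), r + t * dr, c + t * dc, i + t,
          decide (i + (t : Int) = final)⟩ := by
  induction t with
  | zero => omega
  | succ t ih =>
      intro r c i g h1 h2
      rw [aSide, aStep]
      dsimp only
      rw [if_neg (by simp)]
      by_cases ht : t = 0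
      · subst ht
        rw [aSide]
        simp only [wseq, applyW_cons, applyW, List.foldl_nil, AState.mk.injEq]
        refine ⟨by trivial, by push_cast; ring, by push_cast; ring, by push_cast; ring, ?_⟩
        by_cases hq : i + 1 = final
        · simp [hq]
        · simp [hq]
      · have hne : (i + 1 == final) = false := by
          have hn : i + 1 ≠ final := by
            push_cast at h2
            have ht1 : 1 ≤ t := Nat.one_le_iff_ne_zero.mpr ht
            omega
          simpa using hn
        rw [hne]
        rw [ih (r + dr) (c + dc) (i + 1) _ (by omega) (by push_cast at h2 ⊢; omega)]
        simp only [wseq, applyW_cons, AState.mk.injEq]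
        refine ⟨by trivial, by push_cast; ring, by push_cast; ring, by push_cast; ring, ?_⟩
        have he : i + 1 + (t : Int) = i + ((t + 1 : Nat) : Int) := by push_cast; ring
        rw [he]

theorem bRowR_run (t : Nat) (last top : Int) : ∀ (c v : Int) (g : List (List Int)),
    v + t ≤ last + 1 →
    bRowR last top t c ⟨g, v⟩ = ⟨applyW g (wseq top c 0 1 v t), v + t⟩ := by
  induction t with
  | zero => intro c v g h; simp [bRowR, applyW, wseq]
  | succ t ih =>
      intro c v g h
      rw [bRowR]
      dsimp only
      rw [if_neg (by push_cast at h; omega)]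
      rw [bWrite]
      dsimp only
      rw [ih (c + 1) (v + 1) (pvSet g (top, c) v) (by push_cast at h ⊢; omega)]
      simp only [wseq, applyW_cons, BState.mk.injEq, add_zero]
      exact ⟨by trivial, by push_cast; ring⟩

theorem bColD_run (t : Nat) (last right : Int) : ∀ (r v : Int) (g : List (List Int)),
    v + t ≤ last + 1 →
    bColD last right t r ⟨g, v⟩ = ⟨applyW g (wseq r right 1 0 v t), v + t⟩ := by
  induction t with
  | zero => intro r v g h; simp [bColD, applyW, wseq]
  | succ t ih =>
      intro r v g h
      rw [bColD]
      dsimp only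
      rw [if_neg (by push_cast at h; omega)]
      rw [bWrite]
      dsimp only
      rw [ih (r + 1) (v + 1) (pvSet g (r, right) v) (by push_cast at h ⊢; omega)]
      simp only [wseq, applyW_cons, BState.mk.injEq, add_zero]
      exact ⟨by trivial, by push_cast; ring⟩

theorem bRowL_run (t : Nat) (last bottom : Int) : ∀ (c v : Int) (g : List (List Int)),
    v + t ≤ last + 1 →
    bRowL last bottom t c ⟨g, v⟩ = ⟨applyW g (wseq bottom c 0 (-1) v t), v + t⟩ := by
  induction t with
  | zero => intro c v g h; simp [bRowL, applyW, wseq]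
  | succ t ih =>
      intro c v g h
      rw [bRowL]
      dsimp only
      rw [if_neg (by push_cast at h; omega)]
      rw [bWrite]
      dsimp only
      rw [ih (c - 1) (v + 1) (pvSet g (bottom, c) v) (by push_cast at h ⊢; omega)]
      simp only [wseq, applyW_cons, BState.mk.injEq, add_zero]
      constructor
      · rw [show c + (-1 : Int) = c - 1 by ring]
      · push_cast; ring

theorem bColU_run (t : Nat) (last left : Int) : ∀ (r v : Int) (g : List (List Int)),
    v + t ≤ last + 1 →
    bColU last left t r ⟨g, v⟩ = ⟨applyW g (wseq r left (-1) 0 v t), v + t⟩ := by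
  induction t with
  | zero => intro r v g h; simp [bColU, applyW, wseq]
  | succ t ih =>
      intro r v g h
      rw [bColU]
      dsimp only
      rw [if_neg (by push_cast at h; omega)]
      rw [bWrite]
      dsimp only
      rw [ih (r - 1) (v + 1) (pvSet g (r, left) v) (by push_cast at h ⊢; omega)]
      simp only [wseq, applyW_cons, BState.mk.injEq, add_zero]
      constructor
      · rw [show r + (-1 : Int) = r - 1 by ring]
      · push_cast; ring

theorem bRowL_stop (last bottom : Int) (t : Nat) (c v : Int) (g : List (List Int)) (h : last < v) :
    bRowL last bottom t c ⟨g, v⟩ = ⟨g, v⟩ := by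
  cases t with
  | zero => rfl
  | succ t => rw [bRowL]; dsimp only; rw [if_pos h]

theorem bColU_stop (last left : Int) (t : Nat) (r v : Int) (g : List (List Int)) (h : last < v) :
    bColU last left t r ⟨g, v⟩ = ⟨g, v⟩ := by
  cases t with
  | zero => rfl
  | succ t => rw [bColU]; dsimp only; rw [if_pos h]

theorem aLoop_exit (final : Int) (f : Nat) (st : AState) (size : Int)
    (h : st.done = true ∨ size ≤ 0) : aLoop final f st size = st.g := by
  cases f with
  | zero => rfl
  | succ f =>
      rw [aLoop, if_neg]
      rintro ⟨h1, h2⟩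
      rcases h with h | h
      · rw [h1] at h; exact Bool.false_ne_true h
      · omega

theorem bLoop_exit (last : Int) (f : Nat) (top bottom left right : Int) (st : BState)
    (h : bottom < top ∨ right < left ∨ last < st.v) :
    bLoop last f top bottom left right st = st.g := by
  cases f with
  | zero => rfl
  | succ f =>
      rw [bLoop, if_neg]
      rintro ⟨h1, h2, h3⟩
      rcases h with h | h | h <;> omega

theorem ring_seq_eq (mt : Nat) (k i : Int) :
    wseq k k 0 1 i (mt + 2)
      ++ (wseq k (k + ((mt : Int) + 2)) 1 0 (i + ((mt : Int) + 2)) (mt + 2)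
      ++ (wseq (k + ((mt : Int) + 2)) (k + ((mt : Int) + 2)) 0 (-1) (i + 2 * ((mt : Int) + 2)) (mt + 2)
      ++ wseq (k + ((mt : Int) + 2)) k (-1) 0 (i + 3 * ((mt : Int) + 2)) (mt + 2)))
    = wseq k k 0 1 i (mt + 3)
      ++ (wseq (k + 1) (k + ((mt : Int) + 2)) 1 0 (i + ((mt : Int) + 2) + 1) (mt + 2)
      ++ (wseq (k + ((mt : Int) + 2)) (k + ((mt : Int) + 2) - 1) 0 (-1) (i + 2 * ((mt : Int) + 2) + 1) (mt + 2)
      ++ wseq (k + ((mt : Int) + 2) - 1) k (-1) 0 (i + 3 * ((mt : Int) + 2) + 1) (mt + 1))) := by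
  have e1 : wseq k k 0 1 i (mt + 3)
      = wseq k k 0 1 i (mt + 2) ++ [((k, k + ((mt : Int) + 2)), i + ((mt : Int) + 2))] := by
    rw [show mt + 3 = (mt + 2) + 1 by omega, wseq_snoc]
    congr 3 <;> push_cast <;> ring
  have e2 : wseq k (k + ((mt : Int) + 2)) 1 0 (i + ((mt : Int) + 2)) (mt + 2)
      = ((k, k + ((mt : Int) + 2)), i + ((mt : Int) + 2))
          :: wseq (k + 1) (k + ((mt : Int) + 2)) 1 0 (i + ((mt : Int) + 2) + 1) (mt + 1) := by
    show wseq _ _ _ _ _ ((mt + 1) + 1) = _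
    simp [wseq]
  have e3 : wseq (k + 1) (k + ((mt : Int) + 2)) 1 0 (i + ((mt : Int) + 2) + 1) (mt + 2)
      = wseq (k + 1) (k + ((mt : Int) + 2)) 1 0 (i + ((mt : Int) + 2) + 1) (mt + 1)
          ++ [((k + ((mt : Int) + 2), k + ((mt : Int) + 2)), i + 2 * ((mt : Int) + 2))] := by
    rw [show mt + 2 = (mt + 1) + 1 by omega, wseq_snoc]
    congr 3 <;> push_cast <;> ring
  have e4 : wseq (k + ((mt : Int) + 2)) (k + ((mt : Int) + 2)) 0 (-1) (i + 2 * ((mt : Int) + 2)) (mt + 2)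
      = ((k + ((mt : Int) + 2), k + ((mt : Int) + 2)), i + 2 * ((mt : Int) + 2))
          :: wseq (k + ((mt : Int) + 2)) (k + ((mt : Int) + 2) - 1) 0 (-1) (i + 2 * ((mt : Int) + 2) + 1) (mt + 1) := by
    show wseq _ _ _ _ _ ((mt + 1) + 1) = _
    simp [wseq]
    constructor <;> ring
  have e5 : wseq (k + ((mt : Int) + 2)) (k + ((mt : Int) + 2) - 1) 0 (-1) (i + 2 * ((mt : Int) + 2) + 1) (mt + 2)
      = wseq (k + ((mt : Int) + 2)) (k + ((mt : Int) + 2) - 1) 0 (-1) (i + 2 * ((mt : Int) + 2) + 1) (mt + 1)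
          ++ [((k + ((mt : Int) + 2), k), i + 3 * ((mt : Int) + 2))] := by
    rw [show mt + 2 = (mt + 1) + 1 by omega, wseq_snoc]
    congr 3 <;> push_cast <;> ring
  have e6 : wseq (k + ((mt : Int) + 2)) k (-1) 0 (i + 3 * ((mt : Int) + 2)) (mt + 2)
      = ((k + ((mt : Int) + 2), k), i + 3 * ((mt : Int) + 2))
          :: wseq (k + ((mt : Int) + 2) - 1) k (-1) 0 (i + 3 * ((mt : Int) + 2) + 1) (mt + 1) := by
    show wseq _ _ _ _ _ ((mt + 1) + 1) = _
    simp [wseq]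
    constructor <;> ring
  rw [e1, e2, e3, e4, e5, e6]
  simp [List.append_assoc]
theorem main_sim (fA : Nat) : ∀ (fB : Nat) (final m k i : Int) (g : List (List Int)),
    m ≤ (fA : Int) → m ≤ (fB : Int) → final = i + (m + 1) * (m + 1) - 1 →
    aLoop final fA ⟨g, k, k, i, false⟩ m = bLoop (final - 1) fB k (k + m) k (k + m) ⟨g, i⟩ := by
  induction fA with
  | zero =>
      intro fB final m k i g hmA hmB hf
      have hm0 : m ≤ 0 := by exact_mod_cast hmA
      refine ((bLoop_exit (final - 1) fB k (k + m) k (k + m) ⟨g, i⟩ ?_).symm : _)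
      dsimp only
      by_cases hz : m = 0
      · subst hz
        norm_num at hf
        right; right; omega
      · left; omega
  | succ fA ih =>
      intro fB final m k i g hmA hmB hf
      by_cases hm0 : m ≤ 0
      · rw [aLoop_exit _ _ _ _ (Or.inr hm0)]
        refine ((bLoop_exit (final - 1) fB k (k + m) k (k + m) ⟨g, i⟩ ?_).symm : _)
        dsimp only
        by_cases hz : m = 0
        · subst hz
          norm_num at hf
          right; right; omega
        · left; omega
      -- m ≥ 1
      obtain ⟨mt, rfl⟩ : ∃ mt : Nat, m = ((mt + 1 : Nat) : Int) := ⟨(m - 1).toNat, by push_cast; omega⟩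
      obtain ⟨nB, rfl⟩ : ∃ nB : Nat, fB = nB + 1 := ⟨fB - 1, by push_cast at hmB; omega⟩
      rw [aLoop, if_pos (by dsimp only; exact ⟨rfl, by push_cast; omega⟩)]
      rw [bLoop, if_pos (by
        dsimp only
        refine ⟨by push_cast; omega, by push_cast; omega, ?_⟩
        push_cast
        nlinarith [Int.natCast_nonneg mt, hf])]
      simp only [aRing, Int.toNat_natCast]
      by_cases h1 : mt = 0
      · subst h1
        have hf3 : final = i + 3 := by push_cast at hf; linarith
        rw [aSide_run (0 + 1) final 0 1 k k i g (by omega) (by push_cast; omega)]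
        rw [show decide (i + ((0 + 1 : Nat) : Int) = final) = false by
          simp only [decide_eq_false_iff_not]; push_cast; omega]
        rw [aSide_run (0 + 1) final 1 0 (k + ((0 + 1 : Nat) : Int) * 0) (k + ((0 + 1 : Nat) : Int) * 1)
          (i + ((0 + 1 : Nat) : Int)) _ (by omega) (by push_cast; omega)]
        rw [show decide (i + ((0 + 1 : Nat) : Int) + ((0 + 1 : Nat) : Int) = final) = false by
          simp only [decide_eq_false_iff_not]; push_cast; omega]
        rw [aSide_run (0 + 1) final 0 (-1) (k + ((0 + 1 : Nat) : Int) * 0 + ((0 + 1 : Nat) : Int) * 1)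
          (k + ((0 + 1 : Nat) : Int) * 1 + ((0 + 1 : Nat) : Int) * 0)
          (i + ((0 + 1 : Nat) : Int) + ((0 + 1 : Nat) : Int)) _ (by omega) (by push_cast; omega)]
        rw [show decide (i + ((0 + 1 : Nat) : Int) + ((0 + 1 : Nat) : Int) + ((0 + 1 : Nat) : Int) = final) = true by
          simp only [decide_eq_true_eq]; push_cast; omega]
        rw [aSide_skip _ _ _ _ _ rfl]
        rw [aLoop_exit _ _ _ _ (Or.inl rfl)]
        dsimp only
        -- B side
        rw [show (k + ((0 + 1 : Nat) : Int) + 1 - k).toNat = 2 by omega]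
        rw [bRowR_run 2 (final - 1) k k i g (by push_cast; omega)]
        rw [show (k + ((0 + 1 : Nat) : Int) + 1 - (k + 1)).toNat = 1 by omega]
        rw [bColD_run 1 (final - 1) (k + ((0 + 1 : Nat) : Int)) (k + 1) (i + ((2 : Nat) : Int))
          (applyW g (wseq k k 0 1 i 2)) (by push_cast; omega)]
        rw [bRowL_stop _ _ _ _ _ _ (by push_cast; omega)]
        rw [bColU_stop _ _ _ _ _ _ (by push_cast; omega)]
        rw [bLoop_exit _ _ _ _ _ _ _ (by left; push_cast; omega)]
        dsimp only
        simp only [applyW, wseq, List.foldl]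
        push_cast
        ring_nf
      -- m ≥ 2
      obtain ⟨nt, rfl⟩ : ∃ nt : Nat, mt = nt + 1 := ⟨mt - 1, by omega⟩
      have hN : (0 : Int) ≤ (nt : Int) := Int.natCast_nonneg _
      have hfe : final = i + ((nt : Int) + 3) * ((nt : Int) + 3) - 1 := by
        push_cast at hf
        linear_combination hf
      rw [aSide_run (nt + 1 + 1) final 0 1 k k i g (by omega) (by push_cast; nlinarith [hN, hfe])]
      rw [show decide (i + ((nt + 1 + 1 : Nat) : Int) = final) = false by
        simp only [decide_eq_false_iff_not]; push_cast; intro hc; nlinarith [hN, hfe]]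
      rw [aSide_run (nt + 1 + 1) final 1 0 (k + ((nt + 1 + 1 : Nat) : Int) * 0)
        (k + ((nt + 1 + 1 : Nat) : Int) * 1) (i + ((nt + 1 + 1 : Nat) : Int)) _
        (by omega) (by push_cast; nlinarith [hN, hfe])]
      rw [show decide (i + ((nt + 1 + 1 : Nat) : Int) + ((nt + 1 + 1 : Nat) : Int) = final) = false by
        simp only [decide_eq_false_iff_not]; push_cast; intro hc; nlinarith [hN, hfe]]
      rw [aSide_run (nt + 1 + 1) final 0 (-1)
        (k + ((nt + 1 + 1 : Nat) : Int) * 0 + ((nt + 1 + 1 : Nat) : Int) * 1)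
        (k + ((nt + 1 + 1 : Nat) : Int) * 1 + ((nt + 1 + 1 : Nat) : Int) * 0)
        (i + ((nt + 1 + 1 : Nat) : Int) + ((nt + 1 + 1 : Nat) : Int)) _
        (by omega) (by push_cast; nlinarith [hN, hfe])]
      rw [show decide (i + ((nt + 1 + 1 : Nat) : Int) + ((nt + 1 + 1 : Nat) : Int) + ((nt + 1 + 1 : Nat) : Int) = final) = false by
        simp only [decide_eq_false_iff_not]; push_cast; intro hc; nlinarith [hN, hfe]]
      rw [aSide_run (nt + 1 + 1) final (-1) 0
        (k + ((nt + 1 + 1 : Nat) : Int) * 0 + ((nt + 1 + 1 : Nat) : Int) * 1 + ((nt + 1 + 1 : Nat) : Int) * 0)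
        (k + ((nt + 1 + 1 : Nat) : Int) * 1 + ((nt + 1 + 1 : Nat) : Int) * 0 + ((nt + 1 + 1 : Nat) : Int) * (-1))
        (i + ((nt + 1 + 1 : Nat) : Int) + ((nt + 1 + 1 : Nat) : Int) + ((nt + 1 + 1 : Nat) : Int)) _
        (by omega) (by push_cast; nlinarith [hN, hfe])]
      -- B sides
      rw [show (k + ((nt + 1 + 1 : Nat) : Int) + 1 - k).toNat = nt + 3 by omega]
      rw [bRowR_run (nt + 3) (final - 1) k k i g (by push_cast; nlinarith [hN, hfe])]
      rw [show (k + ((nt + 1 + 1 : Nat) : Int) + 1 - (k + 1)).toNat = nt + 2 by omega]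
      rw [bColD_run (nt + 2) (final - 1) (k + ((nt + 1 + 1 : Nat) : Int)) (k + 1) (i + ((nt + 3 : Nat) : Int))
        (applyW g (wseq k k 0 1 i (nt + 3))) (by push_cast; nlinarith [hN, hfe])]
      rw [show (k + ((nt + 1 + 1 : Nat) : Int) - 1 + 1 - k).toNat = nt + 2 by omega]
      rw [bRowL_run (nt + 2) (final - 1) (k + ((nt + 1 + 1 : Nat) : Int)) (k + ((nt + 1 + 1 : Nat) : Int) - 1)
        (i + ((nt + 3 : Nat) : Int) + ((nt + 2 : Nat) : Int))
        (applyW (applyW g (wseq k k 0 1 i (nt + 3)))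
          (wseq (k + 1) (k + ((nt + 1 + 1 : Nat) : Int)) 1 0 (i + ((nt + 3 : Nat) : Int)) (nt + 2)))
        (by push_cast; nlinarith [hN, hfe])]
      rw [show (k + ((nt + 1 + 1 : Nat) : Int) - 1 + 1 - (k + 1)).toNat = nt + 1 by omega]
      rw [bColU_run (nt + 1) (final - 1) k (k + ((nt + 1 + 1 : Nat) : Int) - 1)
        (i + ((nt + 3 : Nat) : Int) + ((nt + 2 : Nat) : Int) + ((nt + 2 : Nat) : Int))
        (applyW (applyW (applyW g (wseq k k 0 1 i (nt + 3)))
          (wseq (k + 1) (k + ((nt + 1 + 1 : Nat) : Int)) 1 0 (i + ((nt + 3 : Nat) : Int)) (nt + 2)))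
          (wseq (k + ((nt + 1 + 1 : Nat) : Int)) (k + ((nt + 1 + 1 : Nat) : Int) - 1) 0 (-1)
            (i + ((nt + 3 : Nat) : Int) + ((nt + 2 : Nat) : Int)) (nt + 2)))
        (by push_cast; nlinarith [hN, hfe])]
      have hgrids :
          applyW (applyW (applyW (applyW g (wseq k k 0 1 i (nt + 1 + 1)))
            (wseq (k + ((nt + 1 + 1 : Nat) : Int) * 0) (k + ((nt + 1 + 1 : Nat) : Int) * 1) 1 0 (i + ((nt + 1 + 1 : Nat) : Int)) (nt + 1 + 1)))
            (wseq (k + ((nt + 1 + 1 : Nat) : Int) * 0 + ((nt + 1 + 1 : Nat) : Int) * 1) (k + ((nt + 1 + 1 : Nat) : Int) * 1 + ((nt + 1 + 1 : Nat) : Int) * 0) 0 (-1) (i + ((nt + 1 + 1 : Nat) : Int) + ((nt + 1 + 1 : Nat) : Int)) (nt + 1 + 1)))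
            (wseq (k + ((nt + 1 + 1 : Nat) : Int) * 0 + ((nt + 1 + 1 : Nat) : Int) * 1 + ((nt + 1 + 1 : Nat) : Int) * 0) (k + ((nt + 1 + 1 : Nat) : Int) * 1 + ((nt + 1 + 1 : Nat) : Int) * 0 + ((nt + 1 + 1 : Nat) : Int) * (-1)) (-1) 0 (i + ((nt + 1 + 1 : Nat) : Int) + ((nt + 1 + 1 : Nat) : Int) + ((nt + 1 + 1 : Nat) : Int)) (nt + 1 + 1))
        = applyW (applyW (applyW (applyW g (wseq k k 0 1 i (nt + 3)))
            (wseq (k + 1) (k + ((nt + 1 + 1 : Nat) : Int)) 1 0 (i + ((nt + 3 : Nat) : Int)) (nt + 2)))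
            (wseq (k + ((nt + 1 + 1 : Nat) : Int)) (k + ((nt + 1 + 1 : Nat) : Int) - 1) 0 (-1) (i + ((nt + 3 : Nat) : Int) + ((nt + 2 : Nat) : Int)) (nt + 2)))
            (wseq (k + ((nt + 1 + 1 : Nat) : Int) - 1) k (-1) 0 (i + ((nt + 3 : Nat) : Int) + ((nt + 2 : Nat) : Int) + ((nt + 2 : Nat) : Int)) (nt + 1)) := by
        have h := ring_seq_eq nt k i
        simp only [applyW, ← List.foldl_append]
        congr 1
        simp only [List.append_assoc] at h ⊢
        push_cast at h ⊢
        ring_nf at h ⊢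
        exact h
      dsimp only
      by_cases h2 : nt = 0
      · subst h2
        have hf8 : final = i + 8 := by push_cast at hfe; linarith
        rw [show decide (i + ((0 + 1 + 1 : Nat) : Int) + ((0 + 1 + 1 : Nat) : Int) + ((0 + 1 + 1 : Nat) : Int) + ((0 + 1 + 1 : Nat) : Int) = final) = true by
          simp only [decide_eq_true_eq]; push_cast; omega]
        rw [aLoop_exit _ _ _ _ (Or.inl rfl)]
        rw [bLoop_exit _ _ _ _ _ _ _ (by dsimp only; right; right; push_cast; omega)]
        dsimp only
        exact hgrids
      · have hnt1 : 1 ≤ nt := Nat.one_le_iff_ne_zero.mpr h2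
        rw [show decide (i + ((nt + 1 + 1 : Nat) : Int) + ((nt + 1 + 1 : Nat) : Int) + ((nt + 1 + 1 : Nat) : Int) + ((nt + 1 + 1 : Nat) : Int) = final) = false by
          simp only [decide_eq_false_iff_not]; push_cast; intro hc; nlinarith [hfe, (by exact_mod_cast hnt1 : (1 : Int) ≤ (nt : Int))]]
        rw [show k + ((nt + 1 + 1 : Nat) : Int) * 0 + ((nt + 1 + 1 : Nat) : Int) * 1 + ((nt + 1 + 1 : Nat) : Int) * 0 + ((nt + 1 + 1 : Nat) : Int) * (-1) + 1 = k + 1 by push_cast; ring]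
        rw [show k + ((nt + 1 + 1 : Nat) : Int) * 1 + ((nt + 1 + 1 : Nat) : Int) * 0 + ((nt + 1 + 1 : Nat) : Int) * (-1) + ((nt + 1 + 1 : Nat) : Int) * 0 + 1 = k + 1 by push_cast; ring]
        rw [show i + ((nt + 1 + 1 : Nat) : Int) + ((nt + 1 + 1 : Nat) : Int) + ((nt + 1 + 1 : Nat) : Int) + ((nt + 1 + 1 : Nat) : Int) = i + 4 * ((nt : Int) + 2) by push_cast; ring]
        rw [show i + ((nt + 3 : Nat) : Int) + ((nt + 2 : Nat) : Int) + ((nt + 2 : Nat) : Int) + ((nt + 1 : Nat) : Int) = i + 4 * ((nt : Int) + 2) by push_cast; ring]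
        rw [show ((nt + 1 + 1 : Nat) : Int) - 2 = ((nt : Nat) : Int) by push_cast; ring]
        rw [← hgrids]
        rw [show k + ((nt + 1 + 1 : Nat) : Int) - 1 = k + 1 + ((nt : Nat) : Int) by push_cast; ring]
        exact ih nB final ((nt : Nat) : Int) (k + 1) (i + 4 * ((nt : Int) + 2)) _
          (by push_cast at hmA ⊢; omega) (by push_cast at hmB ⊢; omega)
          (by push_cast; linear_combination hfe)

-- ===== VERDICT (by name: the statement is the Claim_ definition above) =====
theorem solved_snail_spec : Claim_equal_solved_snail := by
  intro size _
  unfold Spec_solved_snail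
  simp only [solved_snail, solved_snail_alt]
  have h := main_sim (size - 1).toNat (size - 1).toNat (size * size) (size - 1) 0 1
    (List.replicate size.toNat (List.replicate size.toNat 0)) (by omega) (by omega) (by ring)
  rw [show (0 : Int) + (size - 1) = size - 1 by ring] at h
  rw [h]
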